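-- pv_equiv track=rewrite | github.com/Sapphire0912/Programming | Python/Practice/School(Algorithm exam)/practice_1stQ1.py | MusicOrder
-- ===== SOURCE A (Python) =====
-- def MusicOrder(chapter_len, X_sorted, X_sorted_id):
--     result = list()
--     k = 0
--     t = chapter_len
--     while k != len(X_sorted_id):
--         tick, num = X_sorted[k], X_sorted_id[k]
--
--         if t >= tick:
--             t -= tick
--             X_sorted.remove(tick)
--             X_sorted_id.remove(num)
--             result.append(num + 1)
--         else:
--             k += 1
--
--     return result
-- ===== SOURCE B (Python) =====
-- def MusicOrder(chapter_len, X_sorted, X_sorted_id):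
--     # One linear pass over the paired lists: take an item whenever it fits
--     # in the remaining budget; no in-place index juggling or O(n) removes.
--     # NOTE: unlike the original, this does not mutate X_sorted/X_sorted_id;
--     # equivalence is about the return value.
--     t = chapter_len
--     result = []
--     for tick, num in zip(X_sorted, X_sorted_id):
--         if tick <= t:
--             t -= tick
--             result.append(num + 1)
--     return result
-- ===== Notes on version B (the rewrite author's own statement) =====
-- stated objective: faster
-- what changed: Replaces the while-loop that repeatedly calls list.remove (an O(n) scan-and-shift per taken item) and juggles a cursor over the shrinking lists with a single linear pass over zip(X_sorted, X_sorted_id) keeping a running budget; B does not mutate the argument lists (return-value equivalence).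
import Mathlib
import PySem

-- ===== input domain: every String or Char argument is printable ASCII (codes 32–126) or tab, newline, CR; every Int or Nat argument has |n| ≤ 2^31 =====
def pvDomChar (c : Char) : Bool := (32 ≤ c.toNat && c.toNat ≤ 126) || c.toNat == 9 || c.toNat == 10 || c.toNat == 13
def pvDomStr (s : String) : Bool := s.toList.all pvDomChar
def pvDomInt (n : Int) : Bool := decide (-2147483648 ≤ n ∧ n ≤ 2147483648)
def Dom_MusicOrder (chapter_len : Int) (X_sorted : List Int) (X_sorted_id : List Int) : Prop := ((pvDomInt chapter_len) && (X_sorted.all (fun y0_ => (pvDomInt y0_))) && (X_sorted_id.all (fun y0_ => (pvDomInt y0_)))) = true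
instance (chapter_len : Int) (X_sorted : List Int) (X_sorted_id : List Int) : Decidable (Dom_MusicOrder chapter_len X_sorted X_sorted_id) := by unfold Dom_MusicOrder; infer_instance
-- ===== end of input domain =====

-- B replaces A's while-loop with in-place list.remove calls by one linear pass over the
-- zipped lists with a running budget (faster: no O(n) remove per taken item); A mutates
-- X_sorted/X_sorted_id in place while B does not — the equivalence is about the return value.


-- ===== PORT A =====
-- termination helpers for the while loop, cited below
theorem pvGetLt {xs : List Int} {k : Nat} {v : Int}
    (h : PySem.List.pyGet? xs (k : Int) = some v) : k < xs.length := by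
  rw [PySem.List.pyGet?_natCast] at h
  obtain ⟨hk, -⟩ := List.getElem?_eq_some_iff.mp h
  exact hk

theorem pvRemoveLen {xs ys : List Int} {v : Int} (h : PySem.List.remove? xs v = some ys) :
    ys.length + 1 = xs.length := by
  have hv : v ∈ xs := by
    by_contra hv; rw [(PySem.List.remove?_eq_none_iff xs v).2 hv] at h; simp at h
  have : ys = xs.erase v := by
    rw [PySem.List.remove?_eq_some_erase xs v hv] at h; exact (Option.some.inj h).symm
  subst this
  have := List.length_erase_of_mem hv
  have hpos : 0 < xs.length := List.length_pos_of_mem hv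
  omega

-- the while loop of A: state (X_sorted, X_sorted_id, k, t, result)
def MusicOrderLoop (xs ids : List Int) (k : Nat) (t : Int) (result : List Int) : List Int :=
  if k = ids.length then result
  else
    match hgx : PySem.List.pyGet? xs (k : Int), hgi : PySem.List.pyGet? ids (k : Int) with
    | some tick, some num =>
      if t ≥ tick then
        match hrx : PySem.List.remove? xs tick, hri : PySem.List.remove? ids num with
        | some xs', some ids' => MusicOrderLoop xs' ids' k (t - tick) (result ++ [num + 1])
        | some _, none => result   -- unreachable: num ∈ ids
        | none, _ => result        -- unreachable: tick ∈ xs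
      else MusicOrderLoop xs ids (k + 1) t result
    | _, _ => result               -- Python raises IndexError here (outside Pre_)
termination_by xs.length + ids.length - k
decreasing_by
  · have h1 := pvRemoveLen hrx
    have h2 := pvRemoveLen hri
    have hk := pvGetLt hgi
    omega
  · have hk := pvGetLt hgi
    omega

def MusicOrder (chapter_len : Int) (X_sorted : List Int) (X_sorted_id : List Int) : List Int :=
  MusicOrderLoop X_sorted X_sorted_id 0 chapter_len []

-- ===== PORT B =====
-- one pass over zip(X_sorted, X_sorted_id) with state (remaining budget t, result)
def MusicOrder_alt (chapter_len : Int) (X_sorted : List Int) (X_sorted_id : List Int) : List Int :=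
  ((X_sorted.zip X_sorted_id).foldl
    (fun st p => if p.1 ≤ st.1 then (st.1 - p.1, st.2 ++ [p.2 + 1]) else st)
    (chapter_len, ([] : List Int))).2

-- ===== PRECONDITION & SPEC =====
-- A raises IndexError exactly when X_sorted is shorter than X_sorted_id; Pre_ excludes only those.
def Pre_MusicOrder (chapter_len : Int) (X_sorted : List Int) (X_sorted_id : List Int) : Prop :=
  X_sorted_id.length ≤ X_sorted.length
instance (chapter_len : Int) (X_sorted : List Int) (X_sorted_id : List Int) : Decidable (Pre_MusicOrder chapter_len X_sorted X_sorted_id) := by unfold Pre_MusicOrder; infer_instance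
def pvWitness_MusicOrder : Int × List Int × List Int := (10, [3, 5, 4], [0, 1, 2])

def Spec_MusicOrder (chapter_len : Int) (X_sorted : List Int) (X_sorted_id : List Int) (out : List Int) : Prop := out = MusicOrder_alt chapter_len X_sorted X_sorted_id
instance (chapter_len : Int) (X_sorted : List Int) (X_sorted_id : List Int) (out : List Int) : Decidable (Spec_MusicOrder chapter_len X_sorted X_sorted_id out) := by unfold Spec_MusicOrder; infer_instance

-- ===== CLAIM (what is proved, stated in full; the proofs are below) =====
def Claim_equal_MusicOrder : Prop := ∀ (chapter_len : Int) (X_sorted : List Int) (X_sorted_id : List Int), Dom_MusicOrder chapter_len X_sorted X_sorted_id → Pre_MusicOrder chapter_len X_sorted X_sorted_id → Spec_MusicOrder chapter_len X_sorted X_sorted_id (MusicOrder chapter_len X_sorted X_sorted_id)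

-- ===== LEMMAS AND PROOFS =====

-- reference recursion for B's pass (proof-only)
def altGo (t : Int) : List (Int × Int) → List Int
  | [] => []
  | p :: rest => if p.1 ≤ t then (p.2 + 1) :: altGo (t - p.1) rest else altGo t rest

theorem altGo_foldl (l : List (Int × Int)) : ∀ (t : Int) (res : List Int),
    (l.foldl (fun st p => if p.1 ≤ st.1 then (st.1 - p.1, st.2 ++ [p.2 + 1]) else st)
      (t, res)).2 = res ++ altGo t l := by
  induction l with
  | nil => intro t res; simp [altGo]
  | cons p rest ih =>
    intro t res
    simp only [List.foldl_cons, altGo]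
    by_cases h : p.1 ≤ t
    · simp [h, ih]
    · simp [h, ih]

theorem drop_eraseIdx_of_le (xs : List Int) : ∀ (i k : Nat), i ≤ k →
    (xs.eraseIdx i).drop k = xs.drop (k + 1) := by
  induction xs with
  | nil => intro i k _; simp
  | cons x xs ih =>
    intro i k hik
    cases i with
    | zero => simp [List.eraseIdx]
    | succ i =>
      obtain ⟨k, rfl⟩ : ∃ k', k = k' + 1 := ⟨k - 1, by omega⟩
      simp only [List.eraseIdx, List.drop_succ_cons]
      exact ih i k (by omega)

theorem idxOf_getElem_le (xs : List Int) : ∀ (k : Nat) (h : k < xs.length), xs.idxOf xs[k] ≤ k := by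
  induction xs with
  | nil => intro k h; simp at h
  | cons x xs ih =>
    intro k h
    cases k with
    | zero => simp
    | succ k =>
      by_cases hx : x = (x :: xs)[k + 1]
      · rw [← hx]; simp
      · simp only [List.getElem_cons_succ] at hx ⊢
        rw [List.idxOf_cons_ne _ (by exact hx)]
        have := ih k (by simpa using h)
        omega

theorem drop_erase_getElem (xs : List Int) (k : Nat) (h : k < xs.length) :
    (xs.erase xs[k]).drop k = xs.drop (k + 1) := by
  rw [← List.eraseIdx_idxOf_eq_erase]
  exact drop_eraseIdx_of_le xs _ k (idxOf_getElem_le xs k h)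

theorem remove?_getElem (xs : List Int) (k : Nat) (h : k < xs.length) :
    PySem.List.remove? xs xs[k] = some (xs.erase xs[k]) :=
  PySem.List.remove?_eq_some_erase xs _ (xs.getElem_mem h)

-- the loop invariant: only the suffixes from the cursor on matter, and they follow B's pass
theorem loop_eq (n : Nat) : ∀ (xs ids : List Int) (k : Nat) (t : Int) (res : List Int),
    ids.length ≤ xs.length → k ≤ ids.length → ids.length - k ≤ n →
    MusicOrderLoop xs ids k t res = res ++ altGo t ((xs.drop k).zip (ids.drop k)) := by
  induction n with
  | zero =>
    intro xs ids k t res hlen hk hn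
    have hke : k = ids.length := by omega
    rw [MusicOrderLoop, if_pos hke, hke, List.drop_length]
    simp [altGo]
  | succ n ih =>
    intro xs ids k t res hlen hk hn
    by_cases hke : k = ids.length
    · rw [MusicOrderLoop, if_pos hke, hke, List.drop_length]
      simp [altGo]
    · have hki : k < ids.length := by omega
      have hkx : k < xs.length := by omega
      have hgx : PySem.List.pyGet? xs (k : Int) = some xs[k] := by
        rw [PySem.List.pyGet?_natCast]; simp [hkx]
      have hgi : PySem.List.pyGet? ids (k : Int) = some ids[k] := by
        rw [PySem.List.pyGet?_natCast]; simp [hki]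
      have hdx : xs.drop k = xs[k] :: xs.drop (k + 1) := List.drop_eq_getElem_cons hkx
      have hdi : ids.drop k = ids[k] :: ids.drop (k + 1) := List.drop_eq_getElem_cons hki
      rw [MusicOrderLoop, if_neg hke, hgx, hgi]
      by_cases ht : xs[k] ≤ t
      · -- take branch
        simp only [ge_iff_le, if_pos ht]
        have hlex : (xs.erase xs[k]).length = xs.length - 1 :=
          List.length_erase_of_mem (xs.getElem_mem hkx)
        have hlei : (ids.erase ids[k]).length = ids.length - 1 :=
          List.length_erase_of_mem (ids.getElem_mem hki)
        split
        · rename_i hrx hri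
          rw [remove?_getElem xs k hkx] at hrx
          rw [remove?_getElem ids k hki] at hri
          obtain rfl := (Option.some.inj hrx).symm
          obtain rfl := (Option.some.inj hri).symm
          rw [ih (xs.erase xs[k]) (ids.erase ids[k]) k (t - xs[k]) (res ++ [ids[k] + 1])
            (by omega) (by omega) (by omega)]
          rw [drop_erase_getElem xs k hkx, drop_erase_getElem ids k hki]
          rw [hdx, hdi, List.zip_cons_cons, altGo]
          simp [ht]
        · rename_i hrx hri
          rw [remove?_getElem ids k hki] at hri
          simp at hri
        · rename_i hrx
          rw [remove?_getElem xs k hkx] at hrx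
          simp at hrx
      · -- skip branch
        simp only [ge_iff_le, if_neg ht]
        rw [ih xs ids (k + 1) t res hlen (by omega) (by omega)]
        rw [hdx, hdi, List.zip_cons_cons, altGo]
        simp [ht]

-- ===== VERDICT (by name: the statement is the Claim_ definition above) =====
theorem MusicOrder_spec : Claim_equal_MusicOrder := by
  unfold Claim_equal_MusicOrder
  intro chapter_len xs ids _ hpre
  unfold Spec_MusicOrder MusicOrder MusicOrder_alt
  rw [loop_eq ids.length xs ids 0 chapter_len [] hpre (by omega) (by omega)]
  rw [altGo_foldl]
  simp
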